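-- pv_equiv track=rewrite | github.com/VuBui217/dailycodingchallenge | codesignal/test1.py | problem1_solution1
-- ===== SOURCE A (Python) =====
-- def problem1_solution1(text: str) -> int:
--     """Count words whose first and last characters match (case-insensitive)."""
--     count = 0
--     start = 0
--     text += " "  # sentinel space so the final word is evaluated
--
--     for idx, char in enumerate(text):
--         if char == " ":
--             # Skip consecutive spaces (empty words)
--             if idx > start:
--                 first = text[start]
--                 last = text[idx - 1]
--                 if first.lower() == last.lower():
--                     count += 1
--             start = idx + 1
--
--     return count
-- ===== SOURCE B (Python) =====
-- def problem1_solution1(text: str) -> int: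
--     """Count words whose first and last characters match (case-insensitive)."""
--     return sum(1 for w in text.split(" ") if w and w[0].lower() == w[-1].lower())
-- ===== Notes on version B (the rewrite author's own statement) =====
-- stated objective: simpler
-- what changed: Replaces A's manual index-tracking state machine (sentinel space, enumerate, start/idx bookkeeping with indexing back into the text) by splitting on the literal space and counting the non-empty words whose first and last characters match case-insensitively.
import Mathlib
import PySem

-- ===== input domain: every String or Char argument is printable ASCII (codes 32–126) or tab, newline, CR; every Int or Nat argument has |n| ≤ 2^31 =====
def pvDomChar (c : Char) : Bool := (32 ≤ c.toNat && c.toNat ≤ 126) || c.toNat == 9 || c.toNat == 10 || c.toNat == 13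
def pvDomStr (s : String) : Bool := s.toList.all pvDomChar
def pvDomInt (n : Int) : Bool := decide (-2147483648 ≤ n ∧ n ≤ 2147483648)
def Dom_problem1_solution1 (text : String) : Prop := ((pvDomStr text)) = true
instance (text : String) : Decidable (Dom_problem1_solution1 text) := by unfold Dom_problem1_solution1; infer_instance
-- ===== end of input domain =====

-- B replaces A's index-tracking boundary state machine by split-on-space + count (objective: simpler).


-- ===== PORT A =====
-- loop body of A's `for idx, char in enumerate(text)` (state = (count, start));
-- `text[start]` / `text[idx-1]` are ported with pyGetD: both indices are provably
-- in range whenever the branch is reached (0 ≤ start ≤ idx-1 < len(text)), so the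
-- default is never used and this equals Python's (raising) indexing.
def pvStepA (t : List Char) (st : Int × Int) (p : Int × Char) : Int × Int :=
  if p.2 == ' ' then
    if st.2 < p.1 then
      (if PySem.Chars.lowerChar (PySem.List.pyGetD t st.2 ' ')
          == PySem.Chars.lowerChar (PySem.List.pyGetD t (p.1 - 1) ' ')
       then st.1 + 1 else st.1, p.1 + 1)
    else (st.1, p.1 + 1)
  else st

def problem1_solution1 (text : String) : Int :=
  let t := text.toList ++ [' ']  -- text += " "  (sentinel space)
  ((PySem.List.enumerate t 0).foldl (pvStepA t) ((0 : Int), (0 : Int))).1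

-- ===== PORT B =====
-- `w and w[0].lower() == w[-1].lower()`
def pvGood (w : List Char) : Bool :=
  match w.head?, w.getLast? with
  | some a, some b => PySem.Chars.lowerChar a == PySem.Chars.lowerChar b
  | _, _ => false

-- text.split(" ") ported as List.splitOn ' ' (identical semantics for a one-character
-- separator: empty pieces kept, "".split(" ") = [""]); the 0/1-sum is countP.
def problem1_solution1_alt (text : String) : Int :=
  ((text.toList.splitOn ' ').countP pvGood : Int)

-- ===== PRECONDITION & SPEC =====
def Spec_problem1_solution1 (text : String) (out : Int) : Prop := out = problem1_solution1_alt text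
instance (text : String) (out : Int) : Decidable (Spec_problem1_solution1 text out) := by unfold Spec_problem1_solution1; infer_instance

-- ===== CLAIM (what is proved, stated in full; the proofs are below) =====
def Claim_equal_problem1_solution1 : Prop := ∀ (text : String), Dom_problem1_solution1 text → Spec_problem1_solution1 text (problem1_solution1 text)

-- ===== LEMMAS AND PROOFS =====

-- Main loop invariant: scanning the suffix `cs` of `full` from position
-- `start + seg.length`, where `seg` (space-free) is the word accumulated since
-- `start`, yields `count` plus the number of good words in `seg ++ cs`.
theorem pvKeyA (full : List Char) (hlast : full.getLast? = some ' ') :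
    ∀ (cs seg : List Char) (start : Nat) (count : Int),
      full.drop start = seg ++ cs → (' ' ∉ seg) →
      ((PySem.List.enumerate cs ((start : Int) + seg.length)).foldl (pvStepA full)
          (count, (start : Int))).1
        = count + ((seg ++ cs).splitOn ' ').countP pvGood := by
  intro cs
  induction cs with
  | nil =>
    intro seg start count h hsp
    simp only [List.append_nil] at h ⊢
    simp only [PySem.List.enumerate, List.foldl_nil]
    cases hseg : seg with
    | nil =>
      subst hseg
      simp [pvGood]
    | cons a as =>
      exfalso
      have hne : full.drop start ≠ [] := by rw [h, hseg]; simp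
      have hlt : ¬ full.length ≤ start := by
        intro hle
        exact hne (List.drop_eq_nil_of_le hle)
      have h1 : seg.getLast? = some ' ' := by
        rw [← h, List.getLast?_drop, if_neg hlt, hlast]
      exact hsp (List.mem_of_getLast? h1)
  | cons c cs ih =>
    intro seg start count h hsp
    rw [PySem.List.enumerate_cons, List.foldl_cons]
    by_cases hc : c = ' '
    · subst hc
      cases hseg : seg with
      | nil =>
        subst hseg
        have hstep : pvStepA full (count, (start : Int)) ((start : Int) + (([] : List Char).length : Int), ' ')
            = (count, (start : Int) + 1) := by
          simp [pvStepA]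
        rw [hstep]
        have hdrop : full.drop (start + 1) = cs := by
          rw [← List.tail_drop, h]; rfl
        have := ih [] (start + 1) count (by simpa using hdrop) (by simp)
        simp only [List.length_nil, Nat.cast_zero, add_zero, List.nil_append] at this ⊢
        push_cast at this
        rw [this]
        simp [List.splitOn, List.splitOnP_cons, pvGood]
      | cons a as =>
        subst hseg
        -- first and last character of the accumulated word
        have hhead : full[start]? = some a := by
          rw [← List.head?_drop, h]; rfl
        have hfirst : full.getD start ' ' = a := by
          simp [List.getD_eq_getElem?_getD, hhead]
        obtain ⟨lst, hlst⟩ : ∃ lst, (a :: as).getLast? = some lst :=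
          Option.isSome_iff_exists.mp (by simp [List.getLast?_isSome])
        have hlastc : full[start + as.length]? = some lst := by
          have h1 : full[start + as.length]? = (full.drop start)[as.length]? :=
            List.getElem?_drop.symm
          rw [h] at h1
          rw [h1]
          have h2 : ((a :: as) ++ ' ' :: cs)[as.length]? = (a :: as)[as.length]? := by
            apply List.getElem?_append_left
            simp
          rw [h2]
          have h3 : (a :: as).getLast? = (a :: as)[as.length]? := by
            rw [List.getLast?_eq_getElem?]
            simp
          rw [← h3, hlst]
        have hlastD : full.getD (start + as.length) ' ' = lst := by
          simp [List.getD_eq_getElem?_getD, hlastc]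
        have hstep : pvStepA full (count, (start : Int)) ((start : Int) + ((a :: as).length : Int), ' ')
            = ((if PySem.Chars.lowerChar a == PySem.Chars.lowerChar lst then count + 1 else count),
               (start : Int) + ((a :: as).length : Int) + 1) := by
          simp only [pvStepA, List.length_cons]
          rw [if_pos (show (' ' == ' ') = true from rfl),
            if_pos (show (start : Int) < (start : Int) + ((as.length + 1 : Nat) : Int) by push_cast; omega),
            show (start : Int) + ((as.length + 1 : Nat) : Int) - 1 = ((start + as.length : Nat) : Int) by push_cast; ring,
            PySem.List.pyGetD_natCast, PySem.List.pyGetD_natCast, hfirst, hlastD]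
        rw [hstep]
        have hdrop : full.drop (start + (a :: as).length + 1) = cs := by
          have h2 : ((a :: as) ++ ' ' :: cs).drop ((a :: as).length + 1) = cs := by
            rw [show (a :: as) ++ ' ' :: cs = ((a :: as) ++ [' ']) ++ cs by simp,
              List.drop_left' (by simp)]
          have h3 : (full.drop start).drop ((a :: as).length + 1) = full.drop (start + (a :: as).length + 1) := by
            rw [List.drop_drop]
            congr 1
          rw [← h3, h, h2]
        have := ih [] (start + (a :: as).length + 1)
          (if PySem.Chars.lowerChar a == PySem.Chars.lowerChar lst then count + 1 else count)
          (by simpa using hdrop) (by simp)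
        simp only [List.length_nil, Nat.cast_zero, add_zero, List.nil_append] at this
        push_cast at this ⊢
        rw [this]
        have hsplitOn : ((a :: as) ++ ' ' :: cs).splitOn ' ' = (a :: as) :: cs.splitOn ' ' := by
          simp only [List.splitOn]
          apply List.splitOnP_first
          · intro x hx
            simp only [beq_iff_eq]
            intro hxe
            exact hsp (hxe ▸ hx)
          · simp
        rw [hsplitOn, List.countP_cons]
        have hgood : pvGood (a :: as) = (PySem.Chars.lowerChar a == PySem.Chars.lowerChar lst) := by
          simp [pvGood, hlst]
        rw [hgood]
        split_ifs with hcond <;> push_cast <;> ring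
    · have hcb : (c == ' ') = false := by simp [hc]
      have hstep : pvStepA full (count, (start : Int)) ((start : Int) + (seg.length : Int), c)
          = (count, (start : Int)) := by
        simp [pvStepA, hcb]
      rw [hstep]
      have := ih (seg ++ [c]) start count (by simpa using h)
        (by simp only [List.mem_append, List.mem_singleton]; rintro (hin | hco); exacts [hsp hin, hc hco.symm])
      simp only [List.length_append, List.length_cons, List.length_nil] at this
      have harg : (start : Int) + (seg.length : Int) + 1 = (start : Int) + ((seg.length + (0 + 1) : Nat) : Int) := by
        push_cast; ring
      rw [harg, this]
      simp

theorem problem1_solution1_spec_aux (text : String) :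
    problem1_solution1 text = problem1_solution1_alt text := by
  unfold problem1_solution1 problem1_solution1_alt
  have hlast : (text.toList ++ [' ']).getLast? = some ' ' := by simp
  have := pvKeyA (text.toList ++ [' ']) hlast (text.toList ++ [' ']) [] 0 0 (by simp) (by simp)
  simp only [List.length_nil, Nat.cast_zero, add_zero, zero_add, List.nil_append] at this
  rw [this]
  have hsplit : ((text.toList ++ [' ']).splitOn ' ') = text.toList.splitOn ' ' ++ [[]] := by
    simp only [List.splitOn]
    rw [show (' ' :: [] : List Char) = [' '] from rfl] at *
    have := List.splitOnP_append_cons (fun x => x == ' ') text.toList [] ' ' (by simp)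
    simpa using this
  rw [hsplit, List.countP_append]
  simp [pvGood]

-- ===== VERDICT (by name: the statement is the Claim_ definition above) =====
theorem problem1_solution1_spec : Claim_equal_problem1_solution1 := by
  intro text _
  exact problem1_solution1_spec_aux text
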